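-- pv_equiv track=rewrite | github.com/antcap96/advent_of_code | python/year2024/year2024/day2.py | is_safe1
-- ===== SOURCE A (Python) =====
-- def is_valid_delta(delta: int) -> bool:
--     return 1 <= delta <= 3
--
-- def is_safe1(row: list[int]) -> bool:
--     if row[1] > row[0]:
--         sign = +1
--     else:
--         sign = -1
--
--     for a, b in zip(row, row[1:]):
--         delta = b - a
--         if not is_valid_delta(delta * sign):
--             return False
--
--     return True
-- ===== SOURCE B (Python) =====
-- def is_safe1(row):
--     diffs = [b - a for a, b in zip(row, row[1:])]
--     return all(1 <= d <= 3 for d in diffs) or all(-3 <= d <= -1 for d in diffs)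
-- ===== Notes on version B (the rewrite author's own statement) =====
-- stated objective: simpler
-- what changed: Replaces A's sign-detection-then-signed-pass with two direct monotonicity checks (all diffs in [1,3] or all in [-3,-1]) combined by or.
import Mathlib
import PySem

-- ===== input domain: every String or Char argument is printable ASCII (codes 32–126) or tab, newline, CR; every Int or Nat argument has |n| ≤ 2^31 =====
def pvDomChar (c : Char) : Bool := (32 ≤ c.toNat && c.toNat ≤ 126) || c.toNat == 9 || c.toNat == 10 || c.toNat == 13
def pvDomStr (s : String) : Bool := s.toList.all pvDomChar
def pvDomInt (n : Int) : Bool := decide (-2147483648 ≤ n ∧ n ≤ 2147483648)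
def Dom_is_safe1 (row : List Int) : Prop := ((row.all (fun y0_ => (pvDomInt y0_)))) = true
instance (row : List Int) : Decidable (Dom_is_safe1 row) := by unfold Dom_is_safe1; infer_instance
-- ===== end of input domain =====

-- B replaces A's determine-sign-then-one-signed-pass with two independent range checks over
-- the diff list combined by `or` (simpler decomposition; same O(n) cost).
-- On rows shorter than 2 A raises IndexError (excluded by Pre_); B there returns True.

-- ===== PORT A =====
def is_valid_delta (delta : Int) : Bool := decide (1 ≤ delta ∧ delta ≤ 3)

def is_safe1 (row : List Int) : Bool :=
  -- A reads row[1] and row[0]; Pre_ guarantees they exist (Python raises IndexError otherwise)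
  match PySem.List.pyGet? row 1, PySem.List.pyGet? row 0 with
  | some r1, some r0 =>
    let sign : Int := if r1 > r0 then 1 else -1
    -- the for-loop with early `return False` over zip(row, row[1:])
    (row.zip (row.drop 1)).all (fun ab => is_valid_delta ((ab.2 - ab.1) * sign))
  | _, _ => false

-- ===== PORT B =====
def is_safe1_alt (row : List Int) : Bool :=
  let diffs := (row.zip (row.drop 1)).map (fun ab => ab.2 - ab.1)
  diffs.all (fun d => decide (1 ≤ d ∧ d ≤ 3)) || diffs.all (fun d => decide (-3 ≤ d ∧ d ≤ -1))

-- ===== PRECONDITION & SPEC =====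
-- Pre_ excludes rows of length < 2, on which A raises IndexError (row[1]).
def Pre_is_safe1 (row : List Int) : Prop := 2 ≤ row.length
instance (row : List Int) : Decidable (Pre_is_safe1 row) := by unfold Pre_is_safe1; infer_instance
def pvWitness_is_safe1 : List Int := [1, 2, 4]

def Spec_is_safe1 (row : List Int) (out : Bool) : Prop := out = is_safe1_alt row
instance (row : List Int) (out : Bool) : Decidable (Spec_is_safe1 row out) := by unfold Spec_is_safe1; infer_instance

-- ===== CLAIM (what is proved, stated in full; the proofs are below) =====
def Claim_equal_is_safe1 : Prop := ∀ (row : List Int), Dom_is_safe1 row → Pre_is_safe1 row → Spec_is_safe1 row (is_safe1 row)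

-- ===== LEMMAS AND PROOFS =====

theorem valid_pos (d : Int) : is_valid_delta (d * 1) = decide (1 ≤ d ∧ d ≤ 3) := by
  simp only [is_valid_delta, decide_eq_decide]; omega

theorem valid_neg (d : Int) : is_valid_delta (d * (-1)) = decide (-3 ≤ d ∧ d ≤ -1) := by
  simp only [is_valid_delta, decide_eq_decide]; omega

-- ===== VERDICT (by name: the statement is the Claim_ definition above) =====
theorem is_safe1_spec : Claim_equal_is_safe1 := by
  intro row _ hpre
  unfold Pre_is_safe1 at hpre
  match row, hpre with
  | r0 :: r1 :: rest, _ =>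
    unfold Spec_is_safe1
    show _ = _
    simp only [is_safe1, is_safe1_alt]
    rw [show PySem.List.pyGet? (r0 :: r1 :: rest) 1 = some r1 from by
          simp [PySem.List.pyGet?, PySem.List.pyIdx?],
        PySem.List.pyGet?_zero_cons]
    simp only [List.drop, List.zip_cons_cons, List.map_cons, List.all_cons, List.all_map,
      Function.comp_def]
    by_cases h : r1 > r0
    · have hne : decide (-3 ≤ r1 - r0 ∧ r1 - r0 ≤ -1) = false := by
        simp only [decide_eq_false_iff_not]; omega
      simp only [h, if_pos, valid_pos, hne, Bool.false_and, Bool.or_false]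
    · have hne : decide (1 ≤ r1 - r0 ∧ r1 - r0 ≤ 3) = false := by
        simp only [decide_eq_false_iff_not]; omega
      simp only [h, if_neg, valid_neg, hne, Bool.false_and, Bool.false_or, not_false_iff]
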